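-- pv_equiv track=rewrite | github.com/TyronDenker/eve-means-of-profit | src/ui/menus/context_menu_factory.py | _find_common_keys
-- ===== SOURCE A (Python) =====
-- from typing import TYPE_CHECKING, Any
--
-- def _find_common_keys(
--     rows: list[dict[str, Any]], columns: list[tuple[str, str]]
-- ) -> list[tuple[str, str]]:
--     """Find column keys that have non-empty values in all selected rows.
--
--     Args:
--         rows: List of row dictionaries
--         columns: List of (key, title) tuples
--
--     Returns:
--         List of (key, title) tuples for columns with values in all rows
--     """
--     if not rows:
--         return []
--
--     common = []
--     for key, title in columns:
--         if all(row.get(key) for row in rows):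
--             common.append((key, title))
--
--     return common
-- ===== SOURCE B (Python) =====
-- def _find_common_keys(rows, columns):
--     if not rows:
--         return []
--     common = {key for key, _ in columns if rows[0].get(key)}
--     for row in rows[1:]:
--         common &= {key for key, _ in columns if row.get(key)}
--     return [(key, title) for key, title in columns if key in common]
-- ===== Notes on version B (the rewrite author's own statement) =====
-- stated objective: idiomatic
-- what changed: B builds one truthy-key set per row, intersects them across rows, and filters the original column list by membership, instead of A's per-column inner scan over all rows with all().
import Mathlib
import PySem

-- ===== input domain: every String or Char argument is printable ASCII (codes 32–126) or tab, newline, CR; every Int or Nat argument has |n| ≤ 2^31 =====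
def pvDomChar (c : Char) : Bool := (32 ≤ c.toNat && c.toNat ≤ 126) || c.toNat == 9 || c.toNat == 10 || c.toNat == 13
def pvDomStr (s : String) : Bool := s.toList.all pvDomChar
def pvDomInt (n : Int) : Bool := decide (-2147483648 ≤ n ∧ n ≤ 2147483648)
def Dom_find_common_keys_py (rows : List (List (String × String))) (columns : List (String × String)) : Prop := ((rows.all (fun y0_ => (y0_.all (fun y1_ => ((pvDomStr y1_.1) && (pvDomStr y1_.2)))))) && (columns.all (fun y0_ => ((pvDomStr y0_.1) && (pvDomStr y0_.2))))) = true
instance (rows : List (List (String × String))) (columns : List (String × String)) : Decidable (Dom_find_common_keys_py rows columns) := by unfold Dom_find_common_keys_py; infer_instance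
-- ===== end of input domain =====

-- B replaces A's per-column scan over all rows by per-row truthy-key sets intersected across rows (idiomatic; same cost).

-- shared primitive: Python's `bool(row.get(key))` for a string-valued dict (truthy = present with non-empty value)
def pyTruthyGet (row : List (String × String)) (key : String) : Bool :=
  match (PySem.Dict.mk row).get? key with
  | some v => !(v == "")
  | none => false

-- ===== PORT A =====
def find_common_keys_py (rows : List (List (String × String))) (columns : List (String × String)) : List (String × String) :=
  if rows = [] then []
  else
    columns.foldl
      (fun common kt =>
        if rows.all (fun row => pyTruthyGet row kt.1) then common ++ [kt] else common)
      []

-- ===== PORT B =====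
-- {key for key, _ in columns if row.get(key)}
def pvRowKeySet (columns : List (String × String)) (row : List (String × String)) : PySem.Set String :=
  PySem.Set.ofList ((columns.filter (fun kt => pyTruthyGet row kt.1)).map Prod.fst)

def find_common_keys_py_alt (rows : List (List (String × String))) (columns : List (String × String)) : List (String × String) :=
  match rows with
  | [] => []
  | r :: rest =>
    let common := rest.foldl (fun acc row => PySem.Set.inter acc (pvRowKeySet columns row)) (pvRowKeySet columns r)
    columns.filter (fun kt => PySem.Set.contains common kt.1)

-- ===== PRECONDITION & SPEC =====
def Spec_find_common_keys_py (rows : List (List (String × String))) (columns : List (String × String)) (out : List (String × String)) : Prop := out = find_common_keys_py_alt rows columns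
instance (rows : List (List (String × String))) (columns : List (String × String)) (out : List (String × String)) : Decidable (Spec_find_common_keys_py rows columns out) := by unfold Spec_find_common_keys_py; infer_instance

-- ===== CLAIM (what is proved, stated in full; the proofs are below) =====
def Claim_equal_find_common_keys_py : Prop := ∀ (rows : List (List (String × String))) (columns : List (String × String)), Dom_find_common_keys_py rows columns → Spec_find_common_keys_py rows columns (find_common_keys_py rows columns)

-- ===== LEMMAS AND PROOFS =====

-- membership in a row's truthy-key set, for a key that occurs in `columns`
theorem mem_pvRowKeySet {columns row : List (String × String)} {key : String}
    (hcol : key ∈ columns.map Prod.fst) :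
    key ∈ pvRowKeySet columns row ↔ pyTruthyGet row key = true := by
  unfold pvRowKeySet
  rw [PySem.Set.mem_ofList]
  constructor
  · rintro h
    rcases List.mem_map.1 h with ⟨kt, hkt, rfl⟩
    exact (List.mem_filter.1 hkt).2
  · intro ht
    rcases List.mem_map.1 hcol with ⟨kt, hkt, rfl⟩
    exact List.mem_map.2 ⟨kt, List.mem_filter.2 ⟨hkt, ht⟩, rfl⟩

-- membership in the intersection fold ↔ membership in the start set and in every row's set
theorem mem_inter_fold (rest : List (List (String × String))) (s0 : PySem.Set String) (key : String)
    (columns : List (String × String)) :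
    key ∈ rest.foldl (fun acc row => PySem.Set.inter acc (pvRowKeySet columns row)) s0 ↔
      key ∈ s0 ∧ ∀ row ∈ rest, key ∈ pvRowKeySet columns row := by
  induction rest generalizing s0 with
  | nil => simp
  | cons r rest ih =>
    simp only [List.foldl_cons, ih, PySem.Set.mem_inter, List.mem_cons]
    constructor
    · rintro ⟨⟨h0, hr⟩, hall⟩
      exact ⟨h0, fun row hrow => by rcases hrow with rfl | h; exact hr; exact hall row h⟩
    · rintro ⟨h0, hall⟩
      exact ⟨⟨h0, hall r (Or.inl rfl)⟩, fun row h => hall row (Or.inr h)⟩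

theorem find_common_keys_py_spec : Claim_equal_find_common_keys_py := by
  intro rows columns _
  unfold Spec_find_common_keys_py find_common_keys_py find_common_keys_py_alt
  cases rows with
  | nil => simp
  | cons r rest =>
    simp only [reduceCtorEq]
    rw [PySem.List.foldl_append_if_eq_filter, List.nil_append]
    apply List.filter_congr
    intro kt hkt
    have hcol : kt.1 ∈ columns.map Prod.fst := List.mem_map.2 ⟨kt, hkt, rfl⟩
    rw [Bool.eq_iff_iff, PySem.Set.contains_iff, mem_inter_fold]
    simp only [List.all_cons, Bool.and_eq_true, List.all_eq_true, mem_pvRowKeySet hcol]
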